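-- pv_equiv track=rewrite | github.com/fzanollo/algoBio | clase1.py | ManhattanTourist
-- ===== SOURCE A (Python) =====
-- def ManhattanTourist(n,m,Abajo,Derecha):
-- 	s = [ [ None for i in range(len(Derecha)) ] for j in range(len(Abajo[0])) ]
-- 	s[0][0] = 0
-- 	for i in range(1,n+1):
-- 		s[i][0] = s[i-1][0] + Abajo[i-1][0]
-- 	for j in range(1,m+1):
-- 		s[0][j] = s[0][j-1] + Derecha[0][j-1]
-- 	for i in range(1,n+1):
-- 		for j in range(1,m+1):
-- 			s[i][j] = max ( s[i-1][j] + Abajo[i-1][j], s[i][j-1] + Derecha[i][j-1] )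
--
-- 	return s[n][m]
-- ===== SOURCE B (Python) =====
-- def ManhattanTourist(n, m, Abajo, Derecha):
--     # top-down memoized recursion: f(i, j) = longest path from (0,0) to node (i, j)
--     cache = {}
--
--     def f(i, j):
--         if (i, j) in cache:
--             return cache[(i, j)]
--         if i == 0 and j == 0:
--             v = 0
--         elif j == 0:
--             v = f(i - 1, 0) + Abajo[i - 1][0]
--         elif i == 0:
--             v = f(0, j - 1) + Derecha[0][j - 1]
--         else:
--             v = max(f(i - 1, j) + Abajo[i - 1][j], f(i, j - 1) + Derecha[i][j - 1])
--         cache[(i, j)] = v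
--         return v
--
--     return f(n, m)
-- ===== Notes on version B (the rewrite author's own statement) =====
-- stated objective: alternative
-- what changed: Replaces the bottom-up table fill (preallocated 2D list written by three index loops) with a top-down memoized recursion: a helper f(i,j) with a dict cache computes only the cells the goal demands, in demand order.
-- outside the precondition, e.g. on ManhattanTourist(-1, 2, [[1]], [[3, 4], [9, 9], [9, 9]]): A returns 7, B raises RecursionError; on ManhattanTourist(0, -2, [[1]], [[1], [2]]): A returns 0, B raises RecursionError
import Mathlib
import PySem

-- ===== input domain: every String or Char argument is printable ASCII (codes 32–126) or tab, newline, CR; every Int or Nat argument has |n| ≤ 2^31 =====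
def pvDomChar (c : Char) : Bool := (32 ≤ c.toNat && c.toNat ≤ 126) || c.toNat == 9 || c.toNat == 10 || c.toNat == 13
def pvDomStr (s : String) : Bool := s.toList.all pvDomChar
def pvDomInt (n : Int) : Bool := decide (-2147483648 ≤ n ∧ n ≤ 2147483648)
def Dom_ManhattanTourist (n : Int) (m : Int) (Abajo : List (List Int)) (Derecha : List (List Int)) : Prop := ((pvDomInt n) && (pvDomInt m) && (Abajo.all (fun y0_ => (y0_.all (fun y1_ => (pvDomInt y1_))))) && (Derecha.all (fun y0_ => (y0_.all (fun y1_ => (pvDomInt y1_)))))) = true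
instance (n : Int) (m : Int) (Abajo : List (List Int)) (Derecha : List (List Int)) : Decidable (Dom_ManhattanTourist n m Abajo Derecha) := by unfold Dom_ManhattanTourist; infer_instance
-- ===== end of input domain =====

-- B replaces A's bottom-up 2D-table fill (three index loops) by a top-down memoized recursion
-- with a dict cache; same values, demand-driven evaluation. Equivalence is about return values.


-- ===== PORT A =====
-- table cell update s[i][j] = v  (List.set; in range on every admitted input)
def pvSet2 (s : List (List (Option Int))) (i j : Nat) (v : Option Int) : List (List (Option Int)) :=
  s.set i ((s.getD i []).set j v)
-- table cell read s[i][j]; unfilled cells are `none` (Python's None)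
def pvGet2 (s : List (List (Option Int))) (i j : Nat) : Option Int :=
  (s.getD i []).getD j none
-- literal port of A; `.getD 0` totalizes reads that Pre_ guarantees are filled/in range
def ManhattanTourist (n : Int) (m : Int) (Abajo : List (List Int)) (Derecha : List (List Int)) : Int :=
  let s0 : List (List (Option Int)) :=
    List.replicate (Abajo.headI.length) (List.replicate Derecha.length (none : Option Int))
  let s1 := pvSet2 s0 0 0 (some 0)
  let s2 := (PySem.List.pyRange 1 (n+1) 1).foldl (fun s i =>
      pvSet2 s i.toNat 0 (some ((pvGet2 s (i.toNat-1) 0).getD 0 + (Abajo.getD (i.toNat-1) []).getD 0 0))) s1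
  let s3 := (PySem.List.pyRange 1 (m+1) 1).foldl (fun s j =>
      pvSet2 s 0 j.toNat (some ((pvGet2 s 0 (j.toNat-1)).getD 0 + (Derecha.getD 0 []).getD (j.toNat-1) 0))) s2
  let s4 := (PySem.List.pyRange 1 (n+1) 1).foldl (fun s i =>
      (PySem.List.pyRange 1 (m+1) 1).foldl (fun s j =>
        pvSet2 s i.toNat j.toNat (some (max
          ((pvGet2 s (i.toNat-1) j.toNat).getD 0 + (Abajo.getD (i.toNat-1) []).getD j.toNat 0)
          ((pvGet2 s i.toNat (j.toNat-1)).getD 0 + (Derecha.getD i.toNat []).getD (j.toNat-1) 0)))) s) s3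
  (pvGet2 s4 n.toNat m.toNat).getD 0

-- ===== PORT B =====
-- literal port of Source B's memoized helper f(i, j) with its dict cache threaded through
-- (state-passing); indices are Nat because Pre_ admits only 0 ≤ n, 0 ≤ m, where this is
-- exact; `.getD` totalizes list indexing that is in range on every admitted input.
def pvMemo (Ab De : List (List Int)) :
    Nat → Nat → PySem.Dict (Nat × Nat) Int → Int × PySem.Dict (Nat × Nat) Int
  | i, j, c =>
    match c.get? (i, j) with
    | some v => (v, c)
    | none =>
      match i, j with
      | 0, 0 => (0, c.insert (0, 0) 0)
      | i'+1, 0 =>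
        let p := pvMemo Ab De i' 0 c
        let v := p.1 + (Ab.getD i' []).getD 0 0
        (v, p.2.insert (i'+1, 0) v)
      | 0, j'+1 =>
        let p := pvMemo Ab De 0 j' c
        let v := p.1 + (De.getD 0 []).getD j' 0
        (v, p.2.insert (0, j'+1) v)
      | i'+1, j'+1 =>
        let p := pvMemo Ab De i' (j'+1) c
        let q := pvMemo Ab De (i'+1) j' p.2
        let v := max (p.1 + (Ab.getD i' []).getD (j'+1) 0)
                     (q.1 + (De.getD (i'+1) []).getD j' 0)
        (v, q.2.insert (i'+1, j'+1) v)
  termination_by i j _ => (i, j)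
-- literal port of B (Source B): start with an empty cache, return f(n, m)
def ManhattanTourist_alt (n : Int) (m : Int) (Abajo : List (List Int)) (Derecha : List (List Int)) : Int :=
  (pvMemo Abajo Derecha n.toNat m.toNat PySem.Dict.empty).1

-- ===== PRECONDITION & SPEC =====
-- Pre_ excludes exactly the inputs where A raises (IndexError on negative or inconsistent
-- dimensions) or where s[n][m] is read by negative-index wraparound / is an unfilled None:
-- on those wraparound corners A's value is an accident of its oversized table and B raises
-- RecursionError (see cites).
def Pre_ManhattanTourist (n : Int) (m : Int) (Abajo : List (List Int)) (Derecha : List (List Int)) : Prop :=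
  0 ≤ n ∧ 0 ≤ m ∧ Abajo ≠ [] ∧
  n.toNat + 1 ≤ Abajo.headI.length ∧ m.toNat + 1 ≤ Derecha.length ∧
  n.toNat ≤ Abajo.length ∧ (∀ r ∈ Abajo.take n.toNat, m.toNat + 1 ≤ r.length) ∧
  (1 ≤ m → n.toNat + 1 ≤ Derecha.length ∧ ∀ r ∈ Derecha.take (n.toNat + 1), m.toNat ≤ r.length)
instance (n : Int) (m : Int) (Abajo : List (List Int)) (Derecha : List (List Int)) : Decidable (Pre_ManhattanTourist n m Abajo Derecha) := by unfold Pre_ManhattanTourist; infer_instance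

def pvWitness_ManhattanTourist : Int × Int × List (List Int) × List (List Int) :=
  (1, 1, [[3, 4]], [[1], [2]])

def Spec_ManhattanTourist (n : Int) (m : Int) (Abajo : List (List Int)) (Derecha : List (List Int)) (out : Int) : Prop := out = ManhattanTourist_alt n m Abajo Derecha
instance (n : Int) (m : Int) (Abajo : List (List Int)) (Derecha : List (List Int)) (out : Int) : Decidable (Spec_ManhattanTourist n m Abajo Derecha out) := by unfold Spec_ManhattanTourist; infer_instance

-- ===== CLAIM (what is proved, stated in full; the proofs are below) =====
def Claim_equal_ManhattanTourist : Prop := ∀ (n : Int) (m : Int) (Abajo : List (List Int)) (Derecha : List (List Int)), Dom_ManhattanTourist n m Abajo Derecha → Pre_ManhattanTourist n m Abajo Derecha → Spec_ManhattanTourist n m Abajo Derecha (ManhattanTourist n m Abajo Derecha)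

-- ===== LEMMAS AND PROOFS =====

-- the common DP recurrence, totalized with getD 0
def pvL (Abajo Derecha : List (List Int)) : Nat → Nat → Int
  | 0, 0 => 0
  | i+1, 0 => pvL Abajo Derecha i 0 + (Abajo.getD i []).getD 0 0
  | 0, j+1 => pvL Abajo Derecha 0 j + (Derecha.getD 0 []).getD j 0
  | i+1, j+1 => max (pvL Abajo Derecha i (j+1) + (Abajo.getD i []).getD (j+1) 0)
                    (pvL Abajo Derecha (i+1) j + (Derecha.getD (i+1) []).getD j 0)

-- B side: a cache is good when every entry holds the recurrence's value
def pvGoodC (Ab De : List (List Int)) (c : PySem.Dict (Nat × Nat) Int) : Prop :=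
  ∀ i j v, c.get? (i, j) = some v → v = pvL Ab De i j

theorem pvGoodC_insert (Ab De : List (List Int)) (c : PySem.Dict (Nat × Nat) Int)
    (i j : Nat) (h : pvGoodC Ab De c) :
    pvGoodC Ab De (c.insert (i, j) (pvL Ab De i j)) := by
  intro i' j' v hv
  rw [PySem.Dict.get?_insert] at hv
  split at hv
  · next heq => cases hv; cases Prod.mk.injEq .. ▸ heq; simp_all
  · exact h i' j' v hv

theorem pvMemo_spec (Ab De : List (List Int)) :
    ∀ (i j : Nat) (c : PySem.Dict (Nat × Nat) Int), pvGoodC Ab De c →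
      (pvMemo Ab De i j c).1 = pvL Ab De i j ∧ pvGoodC Ab De (pvMemo Ab De i j c).2 := by
  intro i j
  induction i, j using pvL.induct with
  | case1 =>
    intro c hc
    rw [pvMemo]
    cases hg : c.get? ((0 : Nat), (0 : Nat)) with
    | some v => exact ⟨hc 0 0 v hg, hc⟩
    | none =>
      refine ⟨by simp [pvL], ?_⟩
      have := pvGoodC_insert Ab De c 0 0 hc
      simpa [pvL] using this
  | case2 i' ih =>
    intro c hc
    rw [pvMemo]
    cases hg : c.get? ((i' + 1 : Nat), (0 : Nat)) with
    | some v => exact ⟨hc (i'+1) 0 v hg, hc⟩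
    | none =>
      obtain ⟨hv, hg2⟩ := ih c hc
      constructor
      · simp [pvL, hv]
      · have := pvGoodC_insert Ab De (pvMemo Ab De i' 0 c).2 (i'+1) 0 hg2
        simpa [pvL, hv] using this
  | case3 j' ih =>
    intro c hc
    rw [pvMemo]
    cases hg : c.get? ((0 : Nat), (j' + 1 : Nat)) with
    | some v => exact ⟨hc 0 (j'+1) v hg, hc⟩
    | none =>
      obtain ⟨hv, hg2⟩ := ih c hc
      constructor
      · simp [pvL, hv]
      · have := pvGoodC_insert Ab De (pvMemo Ab De 0 j' c).2 0 (j'+1) hg2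
        simpa [pvL, hv] using this
  | case4 i' j' ih1 ih2 =>
    intro c hc
    rw [pvMemo]
    cases hg : c.get? ((i' + 1 : Nat), (j' + 1 : Nat)) with
    | some v => exact ⟨hc (i'+1) (j'+1) v hg, hc⟩
    | none =>
      obtain ⟨hv1, hg1⟩ := ih1 c hc
      obtain ⟨hv2, hg2⟩ := ih2 (pvMemo Ab De i' (j'+1) c).2 hg1
      constructor
      · simp [pvL, hv1, hv2]
      · have := pvGoodC_insert Ab De (pvMemo Ab De (i'+1) j' (pvMemo Ab De i' (j'+1) c).2).2
          (i'+1) (j'+1) hg2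
        simpa [pvL, hv1, hv2] using this

theorem ManhattanTourist_alt_eq_L (n m : Int) (Abajo Derecha : List (List Int)) :
    ManhattanTourist_alt n m Abajo Derecha = pvL Abajo Derecha n.toNat m.toNat := by
  unfold ManhattanTourist_alt
  exact (pvMemo_spec Abajo Derecha n.toNat m.toNat PySem.Dict.empty
    (by intro i j v hv; simp [PySem.Dict.get?_empty] at hv)).1

-- A side below: dimensions invariant of A's table and the three loop invariants
def pvDims (R C : Nat) (s : List (List (Option Int))) : Prop :=
  s.length = R ∧ ∀ i < R, (s.getD i []).length = C

theorem pvDims_set2 (R C : Nat) (s : List (List (Option Int))) (a b : Nat) (v : Option Int)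
    (h : pvDims R C s) : pvDims R C (pvSet2 s a b v) := by
  obtain ⟨h1, h2⟩ := h
  refine ⟨by simp [pvSet2, h1], ?_⟩
  intro i hi
  by_cases hai : a = i
  · subst hai
    have hs : a < s.length := by omega
    simp only [pvSet2, List.getD_eq_getElem?_getD, List.getElem?_set_self hs, Option.getD_some,
      List.length_set]
    simpa [List.getD_eq_getElem?_getD] using h2 a hi
  · simp only [pvSet2, List.getD_eq_getElem?_getD, List.getElem?_set_ne hai]
    simpa [List.getD_eq_getElem?_getD] using h2 i hi

theorem pvGet2_set2_self (R C : Nat) (s : List (List (Option Int))) (a b : Nat) (v : Option Int)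
    (h : pvDims R C s) (ha : a < R) (hb : b < C) : pvGet2 (pvSet2 s a b v) a b = v := by
  obtain ⟨h1, h2⟩ := h
  have hs : a < s.length := by omega
  have hrow : b < (s.getD a []).length := by rw [h2 a ha]; exact hb
  simp only [pvGet2, pvSet2, List.getD_eq_getElem?_getD, List.getElem?_set_self hs, Option.getD_some]
  rw [List.getElem?_set_self (by simpa [List.getD_eq_getElem?_getD] using hrow)]
  rfl

theorem pvGet2_set2_ne (s : List (List (Option Int))) (a b i j : Nat)
    (v : Option Int) (hne : a ≠ i ∨ b ≠ j) : pvGet2 (pvSet2 s a b v) i j = pvGet2 s i j := by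
  by_cases hai : a = i
  · subst hai
    have hbj : b ≠ j := by tauto
    by_cases hlen : a < s.length
    · simp only [pvGet2, pvSet2, List.getD_eq_getElem?_getD, List.getElem?_set_self hlen,
        Option.getD_some, List.getElem?_set_ne hbj]
    · simp [pvGet2, pvSet2, List.set_eq_of_length_le (by omega : s.length ≤ a)]
  · simp [pvGet2, pvSet2, List.getD_eq_getElem?_getD, List.getElem?_set_ne hai]

-- transfer a fold over Python's range(1, n+1) to a fold over List.range n.toNat
theorem pv_foldl_pyRange_shift {α : Type} (f : α → Int → α) (g : α → Nat → α) (init : α)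
    (n : Int) (hn : 0 ≤ n) (hfg : ∀ s (k : Nat), f s (1 + (k : Int)) = g s k) :
    (PySem.List.pyRange 1 (n+1) 1).foldl f init = (List.range n.toNat).foldl g init := by
  rw [PySem.List.pyRange_one]
  have h1 : (n + 1 - 1).toNat = n.toNat := by omega
  rw [h1, List.foldl_map]
  have h2 : (fun (s : α) (k : Nat) => f s (1 + (k : Int))) = g :=
    funext fun s => funext fun k => hfg s k
  rw [h2]

-- Nat-level forms of A's three loop bodies
def pvColF (Abajo : List (List Int)) (s : List (List (Option Int))) (k : Nat) : List (List (Option Int)) :=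
  pvSet2 s (k+1) 0 (some ((pvGet2 s k 0).getD 0 + (Abajo.getD k []).getD 0 0))
def pvRowF (Derecha : List (List Int)) (s : List (List (Option Int))) (k : Nat) : List (List (Option Int)) :=
  pvSet2 s 0 (k+1) (some ((pvGet2 s 0 k).getD 0 + (Derecha.getD 0 []).getD k 0))
def pvInnF (Abajo Derecha : List (List Int)) (i : Nat) (s : List (List (Option Int))) (k : Nat) : List (List (Option Int)) :=
  pvSet2 s i (k+1) (some (max ((pvGet2 s (i-1) (k+1)).getD 0 + (Abajo.getD (i-1) []).getD (k+1) 0)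
                              ((pvGet2 s i k).getD 0 + (Derecha.getD i []).getD k 0)))
def pvIntF (Abajo Derecha : List (List Int)) (M : Nat) (s : List (List (Option Int))) (k : Nat) : List (List (Option Int)) :=
  (List.range M).foldl (pvInnF Abajo Derecha (k+1)) s

theorem portA_nat (n m : Int) (Abajo Derecha : List (List Int)) (hn : 0 ≤ n) (hm : 0 ≤ m) :
    ManhattanTourist n m Abajo Derecha =
      (pvGet2 ((List.range n.toNat).foldl (pvIntF Abajo Derecha m.toNat)
        ((List.range m.toNat).foldl (pvRowF Derecha)
          ((List.range n.toNat).foldl (pvColF Abajo)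
            (pvSet2 (List.replicate Abajo.headI.length (List.replicate Derecha.length (none : Option Int))) 0 0 (some 0)))))
        n.toNat m.toNat).getD 0 := by
  have eCol : ∀ init : List (List (Option Int)),
      (PySem.List.pyRange 1 (n+1) 1).foldl (fun s i =>
        pvSet2 s i.toNat 0 (some ((pvGet2 s (i.toNat-1) 0).getD 0 + (Abajo.getD (i.toNat-1) []).getD 0 0))) init
      = (List.range n.toNat).foldl (pvColF Abajo) init := fun init =>
    pv_foldl_pyRange_shift _ _ init n hn
      (by intro s k; simp [pvColF, show ((1 : Int) + (k : Int)).toNat = k + 1 by omega])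
  have eRow : ∀ init : List (List (Option Int)),
      (PySem.List.pyRange 1 (m+1) 1).foldl (fun s j =>
        pvSet2 s 0 j.toNat (some ((pvGet2 s 0 (j.toNat-1)).getD 0 + (Derecha.getD 0 []).getD (j.toNat-1) 0))) init
      = (List.range m.toNat).foldl (pvRowF Derecha) init := fun init =>
    pv_foldl_pyRange_shift _ _ init m hm
      (by intro s k; simp [pvRowF, show ((1 : Int) + (k : Int)).toNat = k + 1 by omega])
  have eInt : ∀ init : List (List (Option Int)),
      (PySem.List.pyRange 1 (n+1) 1).foldl (fun s i =>
        (PySem.List.pyRange 1 (m+1) 1).foldl (fun s j =>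
          pvSet2 s i.toNat j.toNat (some (max
            ((pvGet2 s (i.toNat-1) j.toNat).getD 0 + (Abajo.getD (i.toNat-1) []).getD j.toNat 0)
            ((pvGet2 s i.toNat (j.toNat-1)).getD 0 + (Derecha.getD i.toNat []).getD (j.toNat-1) 0)))) s) init
      = (List.range n.toNat).foldl (pvIntF Abajo Derecha m.toNat) init := by
    intro init
    refine pv_foldl_pyRange_shift _ _ init n hn ?_
    intro s k
    simp only [show ((1 : Int) + (k : Int)).toNat = k + 1 by omega, pvIntF]
    refine pv_foldl_pyRange_shift _ _ s m hm ?_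
    intro s' k'
    simp [pvInnF, show ((1 : Int) + (k' : Int)).toNat = k' + 1 by omega]
  simp only [ManhattanTourist]
  rw [eCol, eRow, eInt]

theorem pvCol_inv (Abajo Derecha : List (List Int)) (R C N : Nat)
    (s1 : List (List (Option Int))) (hd : pvDims R C s1)
    (h00 : pvGet2 s1 0 0 = some (pvL Abajo Derecha 0 0)) (hNR : N < R) (hC : 0 < C) :
    ∀ k, k ≤ N → pvDims R C ((List.range k).foldl (pvColF Abajo) s1) ∧
      ∀ i ≤ k, pvGet2 ((List.range k).foldl (pvColF Abajo) s1) i 0 = some (pvL Abajo Derecha i 0) := by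
  intro k
  induction k with
  | zero =>
    intro _
    exact ⟨hd, by intro i hi; interval_cases i; simpa using h00⟩
  | succ k ih =>
    intro hk
    obtain ⟨ihd, ihe⟩ := ih (by omega)
    rw [List.range_succ, List.foldl_append]
    simp only [List.foldl_cons, List.foldl_nil, pvColF]
    refine ⟨pvDims_set2 _ _ _ _ _ _ ihd, ?_⟩
    intro i hi
    rcases Nat.lt_or_ge i (k+1) with h | h
    · rw [pvGet2_set2_ne _ _ _ _ _ _ (Or.inl (by omega)), ihe i (by omega)]
    · have hi' : i = k + 1 := by omega
      subst hi'
      rw [pvGet2_set2_self R C _ _ _ _ ihd (by omega) hC, ihe k (by omega)]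
      simp [pvL]

theorem pvRow_inv (Abajo Derecha : List (List Int)) (R C N M : Nat)
    (s2 : List (List (Option Int))) (hd : pvDims R C s2)
    (hcol : ∀ i ≤ N, pvGet2 s2 i 0 = some (pvL Abajo Derecha i 0))
    (hNR : N < R) (hMC : M < C) :
    ∀ k, k ≤ M → pvDims R C ((List.range k).foldl (pvRowF Derecha) s2) ∧
      (∀ i ≤ N, pvGet2 ((List.range k).foldl (pvRowF Derecha) s2) i 0 = some (pvL Abajo Derecha i 0)) ∧
      ∀ j ≤ k, pvGet2 ((List.range k).foldl (pvRowF Derecha) s2) 0 j = some (pvL Abajo Derecha 0 j) := by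
  intro k
  induction k with
  | zero =>
    intro _
    exact ⟨hd, hcol, by intro j hj; interval_cases j; exact hcol 0 (by omega)⟩
  | succ k ih =>
    intro hk
    obtain ⟨ihd, ihc, ihe⟩ := ih (by omega)
    rw [List.range_succ, List.foldl_append]
    simp only [List.foldl_cons, List.foldl_nil, pvRowF]
    refine ⟨pvDims_set2 _ _ _ _ _ _ ihd, ?_, ?_⟩
    · intro i hi
      rw [pvGet2_set2_ne _ _ _ _ _ _ (Or.inr (by omega)), ihc i hi]
    · intro j hj
      rcases Nat.lt_or_ge j (k+1) with h | h
      · rw [pvGet2_set2_ne _ _ _ _ _ _ (Or.inr (by omega)), ihe j (by omega)]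
      · have hj' : j = k + 1 := by omega
        subst hj'
        rw [pvGet2_set2_self R C _ _ _ _ ihd (by omega) (by omega), ihe k (by omega)]
        simp [pvL]

theorem pvInn_inv (Abajo Derecha : List (List Int)) (R C N M i : Nat)
    (s : List (List (Option Int))) (hd : pvDims R C s)
    (hprev : ∀ i' < i, ∀ j ≤ M, pvGet2 s i' j = some (pvL Abajo Derecha i' j))
    (hcol : ∀ i' ≤ N, pvGet2 s i' 0 = some (pvL Abajo Derecha i' 0))
    (hi1 : 1 ≤ i) (hiN : i ≤ N) (hNR : N < R) (hMC : M < C) :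
    ∀ k, k ≤ M → pvDims R C ((List.range k).foldl (pvInnF Abajo Derecha i) s) ∧
      (∀ i' < i, ∀ j ≤ M, pvGet2 ((List.range k).foldl (pvInnF Abajo Derecha i) s) i' j = some (pvL Abajo Derecha i' j)) ∧
      (∀ i' ≤ N, pvGet2 ((List.range k).foldl (pvInnF Abajo Derecha i) s) i' 0 = some (pvL Abajo Derecha i' 0)) ∧
      ∀ j ≤ k, pvGet2 ((List.range k).foldl (pvInnF Abajo Derecha i) s) i j = some (pvL Abajo Derecha i j) := by
  intro k
  induction k with
  | zero =>
    intro _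
    exact ⟨hd, hprev, hcol, by intro j hj; interval_cases j; exact hcol i hiN⟩
  | succ k ih =>
    intro hk
    obtain ⟨ihd, ihp, ihc, ihe⟩ := ih (by omega)
    rw [List.range_succ, List.foldl_append]
    simp only [List.foldl_cons, List.foldl_nil, pvInnF]
    refine ⟨pvDims_set2 _ _ _ _ _ _ ihd, ?_, ?_, ?_⟩
    · intro i' hi' j hj
      rw [pvGet2_set2_ne _ _ _ _ _ _ (Or.inl (by omega)), ihp i' hi' j hj]
    · intro i' hi'
      rw [pvGet2_set2_ne _ _ _ _ _ _ (Or.inr (by omega)), ihc i' hi']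
    · intro j hj
      rcases Nat.lt_or_ge j (k+1) with h | h
      · rw [pvGet2_set2_ne _ _ _ _ _ _ (Or.inr (by omega)), ihe j (by omega)]
      · have hj' : j = k + 1 := by omega
        subst hj'
        rw [pvGet2_set2_self R C _ _ _ _ ihd (by omega) (by omega),
          ihp (i-1) (by omega) (k+1) (by omega), ihe k (by omega)]
        obtain ⟨i', rfl⟩ : ∃ i', i = i' + 1 := ⟨i - 1, by omega⟩
        simp [pvL]

theorem pvInt_inv (Abajo Derecha : List (List Int)) (R C N M : Nat)
    (s3 : List (List (Option Int))) (hd : pvDims R C s3)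
    (hcol : ∀ i ≤ N, pvGet2 s3 i 0 = some (pvL Abajo Derecha i 0))
    (hrow : ∀ j ≤ M, pvGet2 s3 0 j = some (pvL Abajo Derecha 0 j))
    (hNR : N < R) (hMC : M < C) :
    ∀ t, t ≤ N → pvDims R C ((List.range t).foldl (pvIntF Abajo Derecha M) s3) ∧
      (∀ i ≤ N, pvGet2 ((List.range t).foldl (pvIntF Abajo Derecha M) s3) i 0 = some (pvL Abajo Derecha i 0)) ∧
      ∀ i ≤ t, ∀ j ≤ M, pvGet2 ((List.range t).foldl (pvIntF Abajo Derecha M) s3) i j = some (pvL Abajo Derecha i j) := by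
  intro t
  induction t with
  | zero =>
    intro _
    refine ⟨hd, hcol, ?_⟩
    intro i hi j hj
    interval_cases i
    exact hrow j hj
  | succ t ih =>
    intro ht
    obtain ⟨ihd, ihc, ihe⟩ := ih (by omega)
    rw [List.range_succ, List.foldl_append]
    simp only [List.foldl_cons, List.foldl_nil, pvIntF]
    have hinn := pvInn_inv Abajo Derecha R C N M (t+1) _ ihd
      (by intro i' hi' j hj; exact ihe i' (by omega) j hj) ihc
      (by omega) (by omega) hNR hMC M le_rfl
    obtain ⟨hd', hp', hc', he'⟩ := hinn
    refine ⟨hd', hc', ?_⟩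
    intro i hi j hj
    rcases Nat.lt_or_ge i (t+1) with h | h
    · exact hp' i (by omega) j hj
    · have hi' : i = t + 1 := by omega
      subst hi'
      exact he' j hj

theorem ManhattanTourist_eq_L (n m : Int) (Abajo Derecha : List (List Int))
    (h : Pre_ManhattanTourist n m Abajo Derecha) :
    ManhattanTourist n m Abajo Derecha = pvL Abajo Derecha n.toNat m.toNat := by
  obtain ⟨hn, hm, _, hR, hC, _⟩ := h
  rw [portA_nat n m Abajo Derecha hn hm]
  have hd0 : pvDims Abajo.headI.length Derecha.length
      (List.replicate Abajo.headI.length (List.replicate Derecha.length (none : Option Int))) := by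
    refine ⟨by simp, ?_⟩
    intro i hi
    simp [List.getD_eq_getElem?_getD, hi]
  have hd1 := pvDims_set2 _ _ _ 0 0 (some (0 : Int)) hd0
  have h00 : pvGet2 (pvSet2 (List.replicate Abajo.headI.length (List.replicate Derecha.length (none : Option Int))) 0 0 (some 0)) 0 0 = some (pvL Abajo Derecha 0 0) := by
    rw [pvGet2_set2_self _ _ _ _ _ _ hd0 (by omega) (by omega)]
    simp [pvL]
  obtain ⟨hd2, hcol2⟩ := pvCol_inv Abajo Derecha _ _ n.toNat _ hd1 h00 (by omega) (by omega) n.toNat le_rfl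
  obtain ⟨hd3, hcol3, hrow3⟩ := pvRow_inv Abajo Derecha _ _ n.toNat m.toNat _ hd2 hcol2 (by omega) (by omega) m.toNat le_rfl
  obtain ⟨hd4, hcol4, hfill4⟩ := pvInt_inv Abajo Derecha _ _ n.toNat m.toNat _ hd3 hcol3 hrow3 (by omega) (by omega) n.toNat le_rfl
  rw [hfill4 n.toNat le_rfl m.toNat le_rfl]
  rfl

-- ===== VERDICT (by name: the statement is the Claim_ definition above) =====
theorem ManhattanTourist_spec : Claim_equal_ManhattanTourist := by
  intro n m Abajo Derecha _hD hP
  unfold Spec_ManhattanTourist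
  rw [ManhattanTourist_alt_eq_L, ManhattanTourist_eq_L n m Abajo Derecha hP]
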